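-- pv_equiv track=rewrite | github.com/junheeLee96/algorithm | 프로그래머스/3/68646. 풍선 터트리기/풍선 터트리기.py | solution
-- ===== SOURCE A (Python) =====
-- def solution(a):
--     mx = 9999999999999
--     answer = 2
--
--     m = a.index(min(a))
--
--     for i in range(m):
--         if a[i] < mx:
--             answer += 1
--             mx = a[i]
--
--     mx = 9999999999999
--
--     for i in range(len(a)-1,m,-1):
--         if a[i] < mx:
--             answer += 1
--             mx = a[i]
--
--
--
--
--     return answer-1
-- ===== SOURCE B (Python) =====
-- def solution(a):
--     sent = 9999999999999
--     left = []
--     mx = sent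
--     for x in a:
--         left.append(x < mx)
--         if x < mx:
--             mx = x
--     right = []
--     mx = sent
--     for x in reversed(a):
--         right.append(x < mx)
--         if x < mx:
--             mx = x
--     right.reverse()
--     return sum(1 for l, r in zip(left, right) if l or r)
-- ===== Notes on version B (the rewrite author's own statement) =====
-- stated objective: alternative
-- what changed: B drops A's locate-the-global-minimum-and-split-the-array scheme: it computes two independent new-strict-minimum boolean masks (one forward pass, one backward pass over the reversed list) and counts positions where either mask holds, with no min()/index() calls and no index arithmetic around the minimum.
-- outside the precondition, e.g. on solution([]): A raises ValueError, B returns 0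
import Mathlib
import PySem

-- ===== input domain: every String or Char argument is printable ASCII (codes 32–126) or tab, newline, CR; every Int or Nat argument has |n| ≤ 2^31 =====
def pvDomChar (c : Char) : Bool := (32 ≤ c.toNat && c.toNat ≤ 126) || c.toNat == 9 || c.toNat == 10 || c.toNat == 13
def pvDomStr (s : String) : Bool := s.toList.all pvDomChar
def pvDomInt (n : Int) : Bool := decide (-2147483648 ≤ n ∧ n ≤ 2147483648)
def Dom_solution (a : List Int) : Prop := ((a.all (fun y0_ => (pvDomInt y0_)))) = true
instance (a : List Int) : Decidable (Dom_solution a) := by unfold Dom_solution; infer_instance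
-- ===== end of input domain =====

-- B replaces A's locate-the-minimum-and-split scheme by two independent boolean
-- new-minimum masks (forward and backward) combined with OR; alternative decomposition, same O(n) cost.

-- ===== PORT A =====
-- A: m = index of min(a); count new strict minima left of m and (scanning from the
-- right) right of m, starting from answer = 2, return answer - 1.
def solution (a : List Int) : Int :=
  let mx : Int := 9999999999999
  let answer : Int := 2
  match PySem.List.min? a (fun x => x) with
  | none => 0  -- min([]) raises ValueError: excluded by Pre_solution
  | some mn =>
    match PySem.List.index? a mn with
    | none => 0  -- unreachable: mn ∈ a
    | some m =>
      let st1 := (PySem.List.pyRange 0 (m : Int) 1).foldl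
        (fun (st : Int × Int) i =>
          if PySem.List.pyGetD a i 0 < st.2 then (st.1 + 1, PySem.List.pyGetD a i 0) else st)
        (answer, mx)
      let mx2 : Int := 9999999999999
      let st2 := (PySem.List.pyRange (PySem.List.len a - 1) (m : Int) (-1)).foldl
        (fun (st : Int × Int) i =>
          if PySem.List.pyGetD a i 0 < st.2 then (st.1 + 1, PySem.List.pyGetD a i 0) else st)
        (st1.1, mx2)
      st2.1 - 1

-- ===== PORT B =====
-- B: left[i] = "new strict minimum seen scanning left-to-right", right likewise
-- right-to-left; answer = number of positions where left or right holds.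
def solution_alt (a : List Int) : Int :=
  let sent : Int := 9999999999999
  let left := (a.foldl (fun (st : List Bool × Int) x =>
      (st.1 ++ [decide (x < st.2)], if x < st.2 then x else st.2)) ([], sent)).1
  let right := ((a.reverse.foldl (fun (st : List Bool × Int) x =>
      (st.1 ++ [decide (x < st.2)], if x < st.2 then x else st.2)) ([], sent)).1).reverse
  (((left.zip right).countP (fun p => p.1 || p.2) : Nat) : Int)

-- ===== PRECONDITION & SPEC =====
-- Pre_ excludes only the empty list, on which A's min(a) raises ValueError.
def Pre_solution (a : List Int) : Prop := a ≠ []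
instance (a : List Int) : Decidable (Pre_solution a) := by unfold Pre_solution; infer_instance
def pvWitness_solution : List Int := [1]

def Spec_solution (a : List Int) (out : Int) : Prop := out = solution_alt a
instance (a : List Int) (out : Int) : Decidable (Spec_solution a out) := by unfold Spec_solution; infer_instance

-- ===== CLAIM (what is proved, stated in full; the proofs are below) =====
def Claim_equal_solution : Prop := ∀ (a : List Int), Dom_solution a → Pre_solution a → Spec_solution a (solution a)

-- ===== LEMMAS AND PROOFS =====

-- the new-strict-minimum mask of a scan starting at threshold s
def pvMask (s : Int) : List Int → List Bool
  | [] => []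
  | x :: t => decide (x < s) :: pvMask (if x < s then x else s) t

theorem pvMask_length (l : List Int) : ∀ s, (pvMask s l).length = l.length := by
  induction l with
  | nil => intro s; rfl
  | cons x t ih => intro s; simp [pvMask, ih]

theorem pvIf_min (s x : Int) : (if x < s then x else s) = min s x := by
  by_cases h : x < s <;> simp [min_def] <;> omega

-- B's fold builds the mask and the running minimum
theorem pvFoldB (l : List Int) : ∀ (acc : List Bool) (s : Int),
    l.foldl (fun (st : List Bool × Int) x =>
      (st.1 ++ [decide (x < st.2)], if x < st.2 then x else st.2)) (acc, s)
      = (acc ++ pvMask s l, l.foldl min s) := by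
  induction l with
  | nil => intro acc s; simp [pvMask]
  | cons x t ih =>
      intro acc s
      simp only [List.foldl_cons, pvMask]
      rw [ih, pvIf_min]
      simp

-- A's fold counts the true entries of the mask
theorem pvFoldA (l : List Int) : ∀ (c s : Int),
    l.foldl (fun (st : Int × Int) x => if x < st.2 then (st.1 + 1, x) else st) (c, s)
      = (c + (((pvMask s l).countP id : Nat) : Int), l.foldl min s) := by
  induction l with
  | nil => intro c s; simp [pvMask]
  | cons x t ih =>
      intro c s
      by_cases h : x < s
      · simp only [List.foldl_cons, if_pos h, ih, pvMask, decide_eq_true h, List.countP_cons,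
          min_eq_right (le_of_lt h), id, if_pos]
        simp [Prod.ext_iff]
        ring
      · simp only [List.foldl_cons, if_neg h, ih, pvMask, decide_eq_false h, List.countP_cons,
          min_eq_left (by omega : s ≤ x), id]
        simp

theorem pvMask_append (u : List Int) : ∀ (v : List Int) (s : Int),
    pvMask s (u ++ v) = pvMask s u ++ pvMask (u.foldl min s) v := by
  induction u with
  | nil => intro v s; simp [pvMask]
  | cons x t ih => intro v s; simp [pvMask, ih, pvIf_min]

theorem pvMask_false (l : List Int) : ∀ s, (∀ x ∈ l, s ≤ x) → pvMask s l = List.replicate l.length false := by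
  induction l with
  | nil => intro s _; rfl
  | cons x t ih =>
      intro s h
      have hx : s ≤ x := h x (List.mem_cons_self)
      simp only [pvMask, if_neg (by omega : ¬ x < s), List.length_cons, List.replicate_succ]
      rw [ih s (fun y hy => h y (List.mem_cons_of_mem _ hy))]
      simp
      omega

theorem pvZip_right_false (l : List Bool) :
    (l.zip (List.replicate l.length false)).countP (fun p => p.1 || p.2) = l.countP id := by
  induction l with
  | nil => rfl
  | cons x t ih => simp [List.replicate_succ, List.countP_cons, ih]

theorem pvZip_left_false (l : List Bool) :
    ((List.replicate l.length false).zip l).countP (fun p => p.1 || p.2) = l.countP id := by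
  induction l with
  | nil => rfl
  | cons x t ih => simp [List.replicate_succ, List.countP_cons, ih]

theorem pvMapRangeTake (l : List Int) (m : Nat) (h : m ≤ l.length) :
    (List.range m).map (fun k => l.getD k 0) = l.take m := by
  apply List.ext_getElem
  · simp; omega
  · intro i h1 h2
    simp only [List.getElem_map, List.getElem_range, List.getElem_take]
    rw [List.getD_eq_getElem?_getD, List.getElem?_eq_getElem (by simp at h1; omega)]
    rfl

-- ===== VERDICT (by name: the statement is the Claim_ definition above) =====
theorem solution_spec : Claim_equal_solution := by
  intro a hdom hpre
  unfold Spec_solution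
  obtain ⟨mn, hmin⟩ : ∃ mn, PySem.List.min? a (fun x => x) = some mn := by
    cases h : PySem.List.min? a (fun x => x) with
    | none => exact absurd ((PySem.List.min?_eq_none_iff a _).mp h) hpre
    | some mn => exact ⟨mn, rfl⟩
  have hmem : mn ∈ a := PySem.List.min?_mem hmin
  obtain ⟨m, hidx⟩ : ∃ m, PySem.List.index? a mn = some m := by
    cases h : PySem.List.index? a mn with
    | none => exact absurd ((PySem.List.index?_eq_none_iff a mn).mp h) (by simp [hmem])
    | some m => exact ⟨m, rfl⟩
  obtain ⟨pre, suf, hsplit, hlen, hnotin⟩ := (PySem.List.index?_eq_some_iff a mn m).mp hidx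
  have hmin_le : ∀ y ∈ a, mn ≤ y := fun y hy => PySem.List.min?_isMin hmin y hy
  have hpre_gt : ∀ x ∈ pre, mn < x := by
    intro x hx
    have h1 : mn ≤ x := hmin_le x (by rw [hsplit]; exact List.mem_append_left _ hx)
    rcases lt_or_eq_of_le h1 with h | h
    · exact h
    · exact absurd (h ▸ hx) hnotin
  have hsuf_ge : ∀ x ∈ suf, mn ≤ x := by
    intro x hx
    exact hmin_le x (by rw [hsplit]; exact List.mem_append_right _ (List.mem_cons_of_mem _ hx))
  have hsent : mn < 9999999999999 := by
    have hd := hdom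
    unfold Dom_solution at hd
    rw [List.all_eq_true] at hd
    have h2 := hd mn hmem
    simp only [pvDomInt, decide_eq_true_eq] at h2
    omega
  have hmlen : m ≤ a.length := by
    rw [hsplit, ← hlen]; simp only [List.length_append, List.length_cons]; omega
  have htake : a.take m = pre := by rw [hsplit, ← hlen]; simp
  have hdrop : a.drop (m + 1) = suf := by rw [hsplit, ← hlen, List.drop_append]; simp
  -- the two index loops of A are element folds over pre and suf.reverse
  have hL : ∀ init : Int × Int, (PySem.List.pyRange 0 (m : Int) 1).foldl
      (fun (st : Int × Int) i =>
        if PySem.List.pyGetD a i 0 < st.2 then (st.1 + 1, PySem.List.pyGetD a i 0) else st) init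
      = pre.foldl (fun (st : Int × Int) x => if x < st.2 then (st.1 + 1, x) else st) init := by
    intro init
    rw [PySem.List.pyRange_zero_nat, List.foldl_map]
    simp only [PySem.List.pyGetD_natCast]
    rw [← htake, ← pvMapRangeTake a m hmlen, List.foldl_map]
  have hR : ∀ init : Int × Int, (PySem.List.pyRange (PySem.List.len a - 1) (m : Int) (-1)).foldl
      (fun (st : Int × Int) i =>
        if PySem.List.pyGetD a i 0 < st.2 then (st.1 + 1, PySem.List.pyGetD a i 0) else st) init
      = suf.reverse.foldl (fun (st : Int × Int) x => if x < st.2 then (st.1 + 1, x) else st) init := by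
    intro init
    rw [PySem.List.pyRange_neg_one_eq_reverse, List.foldl_reverse]
    rw [show ((m : Int) + 1) = ((m + 1 : Nat) : Int) by push_cast; ring]
    rw [show PySem.List.len a - 1 + 1 = PySem.List.len a by ring]
    have hmap := PySem.List.map_pyGetD_pyRange a 0 (by positivity : (0:Int) ≤ ((m + 1 : Nat) : Int))
    rw [Int.toNat_natCast, hdrop] at hmap
    rw [← hmap, ← List.foldl_reverse, ← List.map_reverse, List.foldl_map]
  -- evaluate port A
  unfold solution
  simp only [hmin, hidx]
  rw [hL, hR, pvFoldA, pvFoldA]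
  -- evaluate port B
  unfold solution_alt
  simp only [pvFoldB]
  have hfp : mn < pre.foldl min 9999999999999 := by
    rcases PySem.List.foldl_min_mem pre (9999999999999 : Int) with h | h
    · omega
    · exact hpre_gt _ h
  have hleft : pvMask 9999999999999 a
      = pvMask 9999999999999 pre ++ true :: List.replicate suf.length false := by
    rw [hsplit, pvMask_append]
    congr 1
    simp only [pvMask, if_pos hfp, decide_eq_true hfp]
    rw [pvMask_false suf mn hsuf_ge]
  have hrevsplit : a.reverse = suf.reverse ++ mn :: pre.reverse := by rw [hsplit]; simp
  have hstate_le : (if mn < suf.reverse.foldl min 9999999999999 then mn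
      else suf.reverse.foldl min 9999999999999) ≤ mn := by
    split_ifs with h
    · omega
    · omega
  have hright : pvMask 9999999999999 a.reverse
      = pvMask 9999999999999 suf.reverse
        ++ decide (mn < suf.reverse.foldl min 9999999999999) :: List.replicate pre.length false := by
    rw [hrevsplit, pvMask_append]
    congr 1
    simp only [pvMask]
    congr 1
    rw [show pre.length = pre.reverse.length from (List.length_reverse).symm]
    apply pvMask_false
    intro x hx
    exact le_trans hstate_le (le_of_lt (hpre_gt x (List.mem_reverse.mp hx)))
  rw [hleft, hright]
  simp only [List.nil_append]
  rw [List.reverse_append, List.reverse_cons, List.reverse_replicate]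
  rw [List.append_assoc, List.singleton_append]
  rw [List.zip_append (by simp [pvMask_length, hlen])]
  rw [List.zip_cons_cons]
  rw [List.countP_append, List.countP_cons]
  rw [if_pos (by simp : ((true, decide (mn < List.foldl min 9999999999999 suf.reverse)).1 ||
      (true, decide (mn < List.foldl min 9999999999999 suf.reverse)).2) = true)]
  rw [show List.replicate pre.length false = List.replicate (pvMask 9999999999999 pre).length false by
    rw [pvMask_length]]
  rw [pvZip_right_false]
  rw [show List.replicate suf.length false
      = List.replicate ((pvMask 9999999999999 suf.reverse).reverse).length false by
    simp [pvMask_length]]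
  rw [pvZip_left_false]
  rw [List.countP_reverse]
  push_cast
  ring
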